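-- pv_equiv track=rewrite | github.com/BahaaIsmail/FFonclick | resp.py | AB
-- ===== SOURCE A (Python) =====
-- def AB (Ar,Br,froz,sym,s):
--     cod = {}
--     k = 0
--     for i in Br :
--         if i in froz :
--             cod[i] = -1
--         elif i in sym :
--             cod[i] = k
--             for j in sym[i] :
--                 cod[j] = k
--             k += 1
--     codes = [i for i in range(k)]
--     B = [0 for i in codes]
--     A = [[0 for j in codes] for i in codes]
--     for i in Br :
--         ci = cod[i]
--         if ci >= 0 :
--             B[ci] += Br[i]
--             for j in Br :
--                 cj = cod[j]
--                 if cj >= 0 :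
--                     A[ci][cj] += Ar[i][j]
--                 else :
--                     B[ci] -= froz[j]*Ar[i][j]
--     return A , B
-- ===== SOURCE B (Python) =====
-- def AB(Ar, Br, froz, sym, s):
--     # same code-assignment phase as the original
--     cod = {}
--     k = 0
--     for i in Br:
--         if i in froz:
--             cod[i] = -1
--         elif i in sym:
--             cod[i] = k
--             for j in sym[i]:
--                 cod[j] = k
--             k += 1
--     # materialise the partition once: members per code, plus the frozen keys
--     groups = [[] for _ in range(k)]
--     frozen = []
--     for i in Br:
--         c = cod[i]
--         if c >= 0:
--             groups[c].append(i)
--         else: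
--             frozen.append(i)
--     # build each reduced cell directly as a sum over the partition blocks
--     A = [[sum(sum(Ar[i][j] for j in gj) for i in gi) for gj in groups] for gi in groups]
--     B = [sum(Br[i] for i in gi)
--          - sum(sum(froz[j] * Ar[i][j] for j in frozen) for i in gi)
--          for gi in groups]
--     return A, B
-- ===== Notes on version B (the rewrite author's own statement) =====
-- stated objective: alternative
-- what changed: Instead of scanning all Br x Br pairs and incrementing cells of a preallocated matrix in place, B materialises the partition (member list per code plus the frozen-key list) once and then constructs each entry of the reduced matrix/vector directly as a sum over the relevant partition blocks, so the cod>=0 test is never re-evaluated per pair and no in-place indexed updates occur.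
import Mathlib
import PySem

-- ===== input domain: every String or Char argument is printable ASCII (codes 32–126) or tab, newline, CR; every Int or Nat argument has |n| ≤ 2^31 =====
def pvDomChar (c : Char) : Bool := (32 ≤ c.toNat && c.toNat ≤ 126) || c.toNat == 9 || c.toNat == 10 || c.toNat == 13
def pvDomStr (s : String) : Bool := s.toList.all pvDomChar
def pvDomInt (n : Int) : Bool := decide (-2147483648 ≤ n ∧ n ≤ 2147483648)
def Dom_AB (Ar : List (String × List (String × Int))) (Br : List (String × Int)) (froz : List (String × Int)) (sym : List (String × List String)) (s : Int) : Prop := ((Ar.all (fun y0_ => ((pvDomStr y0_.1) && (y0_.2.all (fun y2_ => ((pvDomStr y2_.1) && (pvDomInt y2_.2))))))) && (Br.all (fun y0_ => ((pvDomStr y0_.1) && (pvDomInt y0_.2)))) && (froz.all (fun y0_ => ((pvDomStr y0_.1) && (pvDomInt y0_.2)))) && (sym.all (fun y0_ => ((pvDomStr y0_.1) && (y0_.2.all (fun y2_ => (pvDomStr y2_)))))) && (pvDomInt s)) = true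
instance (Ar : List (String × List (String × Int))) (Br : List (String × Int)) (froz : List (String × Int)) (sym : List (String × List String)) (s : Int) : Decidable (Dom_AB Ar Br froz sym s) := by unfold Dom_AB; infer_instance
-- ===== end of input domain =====

-- B builds the partition (member list per code + frozen keys) once and writes every
-- reduced cell as a direct sum over the blocks, instead of A's in-place pairwise
-- accumulation; objective: alternative decomposition (same asymptotic cost).

-- ===== PORT A =====
-- shared phase 1: the code-assignment loop (identical in Source A and Source B)
def pvCod (BrD frozD : PySem.Dict String Int) (symD : PySem.Dict String (List String)) :
    PySem.Dict String Int × Int :=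
  BrD.keys.foldl (fun ck i =>
    if frozD.contains i then (ck.1.insert i (-1), ck.2)
    else if symD.contains i then
      ((symD.getD i []).foldl (fun d j => d.insert j ck.2) (ck.1.insert i ck.2), ck.2 + 1)
    else ck) (PySem.Dict.empty, (0 : Int))

-- A[ci][cj] += d  /  B[ci] += d  (in-range Python index; out of range never occurs in A)
def pvAddAt (v : List Int) (n : Nat) (d : Int) : List Int := v.set n (v.getD n 0 + d)
def pvAddAt2 (M : List (List Int)) (r c : Nat) (d : Int) : List (List Int) :=
  M.set r (pvAddAt (M.getD r []) c d)

-- the second (accumulation) double loop of Source A over the key list K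
def pvOuter (c br fz : String → Int) (ar : String → String → Int) (K : List String)
    (MV : List (List Int) × List Int) : List (List Int) × List Int :=
  K.foldl (fun MV i =>
    if 0 ≤ c i then
      K.foldl (fun MV2 j =>
        if 0 ≤ c j then (pvAddAt2 MV2.1 (c i).toNat (c j).toNat (ar i j), MV2.2)
        else (MV2.1, pvAddAt MV2.2 (c i).toNat (-(fz j * ar i j))))
        (MV.1, pvAddAt MV.2 (c i).toNat (br i))
    else MV) MV

def AB (Ar : List (String × List (String × Int))) (Br : List (String × Int)) (froz : List (String × Int)) (sym : List (String × List String)) (s : Int) : List (List Int) × List Int :=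
  let ArD := PySem.Dict.ofList (Ar.map (fun p => (p.1, PySem.Dict.ofList p.2)))
  let BrD := PySem.Dict.ofList Br
  let frozD := PySem.Dict.ofList froz
  let symD := PySem.Dict.ofList sym
  let ck := pvCod BrD frozD symD
  let cod := ck.1
  let k := ck.2
  let codes := PySem.List.pyRange 0 k 1
  let B0 : List Int := codes.map (fun _ => 0)
  let A0 : List (List Int) := codes.map (fun _ => codes.map (fun _ => 0))
  let c : String → Int := fun i => cod.getD i (-1)
  let br : String → Int := fun i => BrD.getD i 0
  let fz : String → Int := fun j => frozD.getD j 0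
  let ar : String → String → Int := fun i j => (ArD.getD i PySem.Dict.empty).getD j 0
  let MV := pvOuter c br fz ar BrD.keys (A0, B0)
  (MV.1, MV.2)

-- ===== PORT B =====
-- groups[c].append(i)
def pvAppAt (g : List (List String)) (n : Nat) (x : String) : List (List String) :=
  g.set n (g.getD n [] ++ [x])

-- the single partition pass of Source B: (groups, frozen)
def pvGroups (c : String → Int) (K : List String) (g0 : List (List String)) :
    List (List String) × List String :=
  K.foldl (fun gf i =>
    if 0 ≤ c i then (pvAppAt gf.1 (c i).toNat i, gf.2) else (gf.1, gf.2 ++ [i])) (g0, [])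

def AB_alt (Ar : List (String × List (String × Int))) (Br : List (String × Int)) (froz : List (String × Int)) (sym : List (String × List String)) (s : Int) : List (List Int) × List Int :=
  let ArD := PySem.Dict.ofList (Ar.map (fun p => (p.1, PySem.Dict.ofList p.2)))
  let BrD := PySem.Dict.ofList Br
  let frozD := PySem.Dict.ofList froz
  let symD := PySem.Dict.ofList sym
  let ck := pvCod BrD frozD symD
  let cod := ck.1
  let k := ck.2
  let c : String → Int := fun i => cod.getD i (-1)
  let br : String → Int := fun i => BrD.getD i 0
  let fz : String → Int := fun j => frozD.getD j 0
  let ar : String → String → Int := fun i j => (ArD.getD i PySem.Dict.empty).getD j 0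
  let gf := pvGroups c BrD.keys ((PySem.List.pyRange 0 k 1).map (fun _ => ([] : List String)))
  (gf.1.map (fun gi => gf.1.map (fun gj => (gi.map (fun i => (gj.map (fun j => ar i j)).sum)).sum)),
   gf.1.map (fun gi => (gi.map (fun i => br i)).sum -
     (gi.map (fun i => (gf.2.map (fun j => fz j * ar i j)).sum)).sum))

-- ===== PRECONDITION & SPEC =====
-- Pre_AB = exactly the inputs where the Python raises no KeyError: every Br key receives a
-- code in phase 1 (is frozen, symmetric, or a symmetry image of an unfrozen symmetric Br
-- key), and Ar has a full row over the Br keys for every Br key whose final code is ≥ 0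
-- (not frozen, or re-coded by a later unfrozen symmetric key listing it).
def Pre_AB (Ar : List (String × List (String × Int))) (Br : List (String × Int)) (froz : List (String × Int)) (sym : List (String × List String)) (s : Int) : Prop :=
  let ArD := PySem.Dict.ofList (Ar.map (fun p => (p.1, PySem.Dict.ofList p.2)))
  let BrD := PySem.Dict.ofList Br
  let frozD := PySem.Dict.ofList froz
  let symD := PySem.Dict.ofList sym
  let keys := BrD.keys
  (∀ x ∈ keys, frozD.contains x = true ∨ symD.contains x = true ∨
      ∃ i ∈ keys, frozD.contains i = false ∧ symD.contains i = true ∧ x ∈ symD.getD i []) ∧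
  (∀ x ∈ keys, (frozD.contains x = false ∨
      ∃ i ∈ keys, keys.idxOf x < keys.idxOf i ∧ frozD.contains i = false ∧
        symD.contains i = true ∧ x ∈ symD.getD i []) →
    ArD.contains x = true ∧ ∀ j ∈ keys, (ArD.getD x PySem.Dict.empty).contains j = true)
instance (Ar : List (String × List (String × Int))) (Br : List (String × Int)) (froz : List (String × Int)) (sym : List (String × List String)) (s : Int) : Decidable (Pre_AB Ar Br froz sym s) := by unfold Pre_AB; infer_instance

def pvWitness_AB : (List (String × List (String × Int))) × (List (String × Int)) × (List (String × Int)) × (List (String × List String)) × Int :=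
  ([("x", [("x", 2)])], [("x", 3)], [], [("x", [])], 0)

def Spec_AB (Ar : List (String × List (String × Int))) (Br : List (String × Int)) (froz : List (String × Int)) (sym : List (String × List String)) (s : Int) (out : List (List Int) × List Int) : Prop := out = AB_alt Ar Br froz sym s
instance (Ar : List (String × List (String × Int))) (Br : List (String × Int)) (froz : List (String × Int)) (sym : List (String × List String)) (s : Int) (out : List (List Int) × List Int) : Decidable (Spec_AB Ar Br froz sym s out) := by unfold Spec_AB; infer_instance

-- ===== CLAIM (what is proved, stated in full; the proofs are below) =====
def Claim_equal_AB : Prop := ∀ (Ar : List (String × List (String × Int))) (Br : List (String × Int)) (froz : List (String × Int)) (sym : List (String × List String)) (s : Int), Dom_AB Ar Br froz sym s → Pre_AB Ar Br froz sym s → Spec_AB Ar Br froz sym s (AB Ar Br froz sym s)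

-- ===== LEMMAS AND PROOFS =====

-- (the equivalence in fact holds for every input, so Pre_AB is not needed by the proof;
--  it delimits where the Python A returns rather than raising KeyError)

-- basic facts about pvAddAt / pvAddAt2 / pvAppAt --------------------------------------

theorem pvSet_getD {α : Type} (g : List α) (n : Nat) (a d : α) (r : Nat) :
    (g.set n a).getD r d = if n = r ∧ r < g.length then a else g.getD r d := by
  by_cases h1 : n = r
  · subst h1
    by_cases h2 : n < g.length
    · simp [List.getD_eq_getElem?_getD, List.getElem?_set, h2]
    · rw [if_neg (fun h => h2 h.2), List.set_eq_of_length_le (by omega)]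
  · rw [if_neg (fun h => h1 h.1)]
    simp [List.getD_eq_getElem?_getD, List.getElem?_set, h1]

theorem pvAddAt_length (v : List Int) (n : Nat) (d : Int) : (pvAddAt v n d).length = v.length := by
  simp [pvAddAt]

theorem pvAddAt_getD (v : List Int) (n : Nat) (d : Int) (m : Nat) :
    (pvAddAt v n d).getD m 0 = if n = m ∧ m < v.length then v.getD m 0 + d else v.getD m 0 := by
  unfold pvAddAt
  rw [pvSet_getD]
  split_ifs with h
  · obtain ⟨rfl, _⟩ := h; rfl
  · rfl

theorem pvAddAt_zero (v : List Int) (n : Nat) : pvAddAt v n 0 = v := by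
  unfold pvAddAt
  by_cases h : n < v.length
  · rw [List.getD_eq_getElem v 0 h]; simpa using List.set_getElem_self h
  · exact List.set_eq_of_length_le (by omega)

theorem pvAddAt_pvAddAt (v : List Int) (n : Nat) (d1 d2 : Int) :
    pvAddAt (pvAddAt v n d1) n d2 = pvAddAt v n (d1 + d2) := by
  by_cases h : n < v.length
  · unfold pvAddAt
    rw [List.set_set]
    congr 1
    rw [pvSet_getD, if_pos ⟨rfl, h⟩]
    ring
  · have e1 : ∀ d : Int, pvAddAt v n d = v := by
      intro d; unfold pvAddAt; exact List.set_eq_of_length_le (by omega)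
    rw [e1, e1, e1]

theorem pvAddAt2_length (M : List (List Int)) (r c : Nat) (d : Int) :
    (pvAddAt2 M r c d).length = M.length := by simp [pvAddAt2]

-- cell access
def pvCell (M : List (List Int)) (r s : Nat) : Int := (M.getD r []).getD s 0

theorem pvAddAt2_rowlen (M : List (List Int)) (n m : Nat) (d : Int) (r : Nat) :
    ((pvAddAt2 M n m d).getD r []).length = (M.getD r []).length := by
  unfold pvAddAt2
  rw [pvSet_getD]
  split_ifs with h
  · obtain ⟨rfl, _⟩ := h; simp [pvAddAt_length]
  · rfl

theorem pvAddAt2_cell (M : List (List Int)) (n m : Nat) (d : Int) (r s : Nat) :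
    pvCell (pvAddAt2 M n m d) r s =
      if n = r ∧ r < M.length ∧ m = s ∧ s < (M.getD r []).length then pvCell M r s + d
      else pvCell M r s := by
  unfold pvCell pvAddAt2
  rw [pvSet_getD]
  by_cases h1 : n = r ∧ r < M.length
  · rw [if_pos h1]
    obtain ⟨rfl, h2⟩ := h1
    rw [pvAddAt_getD]
    by_cases h3 : m = s ∧ s < (M.getD n []).length
    · rw [if_pos h3, if_pos ⟨rfl, h2, h3.1, h3.2⟩]
    · rw [if_neg h3, if_neg (by tauto)]
  · rw [if_neg h1, if_neg (by tauto)]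

-- generic fold lemmas ------------------------------------------------------------------

-- vector fold of in-place additions = componentwise sum
theorem pvFoldV_length {β : Type} (L : List β) (P : β → Prop) [DecidablePred P]
    (idx : β → Nat) (d : β → Int) (v : List Int) :
    (L.foldl (fun v x => if P x then pvAddAt v (idx x) (d x) else v) v).length = v.length := by
  induction L generalizing v with
  | nil => rfl
  | cons x L ih => simp only [List.foldl_cons]; rw [ih]; split_ifs <;> simp [pvAddAt_length]

theorem pvFoldV_getD {β : Type} (L : List β) (P : β → Prop) [DecidablePred P]
    (idx : β → Nat) (d : β → Int) (v : List Int) (r : Nat) :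
    (L.foldl (fun v x => if P x then pvAddAt v (idx x) (d x) else v) v).getD r 0 =
      v.getD r 0 + (L.map (fun x => if P x ∧ idx x = r ∧ r < v.length then d x else 0)).sum := by
  induction L generalizing v with
  | nil => simp
  | cons x L ih =>
    simp only [List.foldl_cons, List.map_cons, List.sum_cons]
    by_cases hp : P x
    · rw [if_pos hp, ih]
      simp only [pvAddAt_length]
      rw [pvAddAt_getD]
      split_ifs with h1 h2 h3 <;> first | omega | (exfalso; tauto)
    · rw [if_neg hp, ih]; simp [hp]

-- a fold of additions all at the SAME index collapses to one addition
theorem pvFoldV_const {β : Type} (L : List β) (P : β → Prop) [DecidablePred P]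
    (a : Nat) (e : β → Int) (v : List Int) :
    L.foldl (fun v x => if P x then pvAddAt v a (e x) else v) v =
      pvAddAt v a ((L.map (fun x => if P x then e x else 0)).sum) := by
  induction L generalizing v with
  | nil => simp [pvAddAt_zero]
  | cons x L ih =>
    simp only [List.foldl_cons, List.map_cons, List.sum_cons]
    by_cases hp : P x
    · rw [if_pos hp, if_pos hp, ih, pvAddAt_pvAddAt]
    · rw [if_neg hp, if_neg hp, ih]; simp

-- matrix fold of in-place cell additions = cellwise sum
theorem pvFoldM_length {β : Type} (L : List β) (P : β → Prop) [DecidablePred P]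
    (i1 i2 : β → Nat) (d : β → Int) (M : List (List Int)) :
    (L.foldl (fun M x => if P x then pvAddAt2 M (i1 x) (i2 x) (d x) else M) M).length = M.length := by
  induction L generalizing M with
  | nil => rfl
  | cons x L ih => simp only [List.foldl_cons]; rw [ih]; split_ifs <;> simp [pvAddAt2_length]

theorem pvFoldM_rowlen {β : Type} (L : List β) (P : β → Prop) [DecidablePred P]
    (i1 i2 : β → Nat) (d : β → Int) (M : List (List Int)) (r : Nat) :
    ((L.foldl (fun M x => if P x then pvAddAt2 M (i1 x) (i2 x) (d x) else M) M).getD r []).length =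
      (M.getD r []).length := by
  induction L generalizing M with
  | nil => rfl
  | cons x L ih =>
    simp only [List.foldl_cons]; rw [ih]; split_ifs
    · rw [pvAddAt2_rowlen]
    · rfl

theorem pvFoldM_cell {β : Type} (L : List β) (P : β → Prop) [DecidablePred P]
    (i1 i2 : β → Nat) (d : β → Int) (M : List (List Int)) (r s : Nat) :
    pvCell (L.foldl (fun M x => if P x then pvAddAt2 M (i1 x) (i2 x) (d x) else M) M) r s =
      pvCell M r s + (L.map (fun x =>
        if P x ∧ i1 x = r ∧ r < M.length ∧ i2 x = s ∧ s < (M.getD r []).length then d x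
        else 0)).sum := by
  induction L generalizing M with
  | nil => simp
  | cons x L ih =>
    simp only [List.foldl_cons, List.map_cons, List.sum_cons]
    by_cases hp : P x
    · rw [if_pos hp, ih]
      simp only [pvAddAt2_length, pvAddAt2_rowlen]
      rw [pvAddAt2_cell]
      split_ifs with h1 h2 h3 <;> first | omega | (exfalso; tauto)
    · rw [if_neg hp, ih]; simp [hp]

-- append-at fold for the groups list
theorem pvFoldG_length {β : Type} (L : List β) (P : β → Prop) [DecidablePred P]
    (idx : β → Nat) (f : β → String) (g : List (List String)) :
    (L.foldl (fun g x => if P x then g.set (idx x) (g.getD (idx x) [] ++ [f x]) else g) g).length = g.length := by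
  induction L generalizing g with
  | nil => rfl
  | cons x L ih => simp only [List.foldl_cons]; rw [ih]; split_ifs <;> simp

theorem pvFoldG_getD {β : Type} (L : List β) (P : β → Prop) [DecidablePred P]
    (idx : β → Nat) (f : β → String) (g : List (List String)) (r : Nat) :
    (L.foldl (fun g x => if P x then g.set (idx x) (g.getD (idx x) [] ++ [f x]) else g) g).getD r [] =
      g.getD r [] ++ (L.filter (fun x => decide (P x ∧ idx x = r ∧ r < g.length))).map f := by
  induction L generalizing g with
  | nil => simp
  | cons x L ih =>
    simp only [List.foldl_cons, List.filter_cons]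
    by_cases hc : P x ∧ idx x = r ∧ r < g.length
    · obtain ⟨hp, hi, hr⟩ := hc
      rw [if_pos hp, ih]
      simp only [List.length_set]
      rw [pvSet_getD, if_pos ⟨hi, hr⟩, hi]
      simp [hp, hi, hr, List.append_assoc]
    · by_cases hp : P x
      · rw [if_pos hp, ih]
        simp only [List.length_set]
        rw [pvSet_getD, if_neg (fun hh => hc ⟨hp, hh⟩)]
        simp [hc]
      · rw [if_neg hp, ih]; simp [hc]

-- sums over guarded maps vs sums over filters
theorem pvSum_ite_filter {β : Type} (L : List β) (P : β → Prop) [DecidablePred P] (f : β → Int) :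
    (L.map (fun x => if P x then f x else 0)).sum = ((L.filter (fun x => decide (P x))).map f).sum := by
  induction L with
  | nil => rfl
  | cons x L ih =>
    simp only [List.map_cons, List.sum_cons, List.filter_cons]
    by_cases hp : P x <;> simp [hp, ih]

theorem pvSum_map_sub {β : Type} (L : List β) (f g : β → Int) :
    (L.map (fun x => f x - g x)).sum = (L.map f).sum - (L.map g).sum := by
  induction L with
  | nil => simp
  | cons x L ih => simp [ih]; ring

theorem pvSum_map_neg {β : Type} (L : List β) (f : β → Int) :
    (L.map (fun x => -f x)).sum = -(L.map f).sum := by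
  induction L with
  | nil => simp
  | cons x L ih => simp [ih]; ring

-- decoupling the paired folds -----------------------------------------------------------

theorem pvInner_fst (c fz : String → Int) (ar : String → String → Int) (a : Nat) (i : String)
    (K : List String) (M : List (List Int)) (V : List Int) :
    (K.foldl (fun MV2 j => if 0 ≤ c j then (pvAddAt2 MV2.1 a (c j).toNat (ar i j), MV2.2)
        else (MV2.1, pvAddAt MV2.2 a (-(fz j * ar i j)))) (M, V)).1 =
      K.foldl (fun M j => if 0 ≤ c j then pvAddAt2 M a (c j).toNat (ar i j) else M) M := by
  induction K generalizing M V with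
  | nil => rfl
  | cons j K ih =>
    simp only [List.foldl_cons]
    by_cases h : 0 ≤ c j
    · simp only [if_pos h]; exact ih _ _
    · simp only [if_neg h]; exact ih _ _

theorem pvInner_snd (c fz : String → Int) (ar : String → String → Int) (a : Nat) (i : String)
    (K : List String) (M : List (List Int)) (V : List Int) :
    (K.foldl (fun MV2 j => if 0 ≤ c j then (pvAddAt2 MV2.1 a (c j).toNat (ar i j), MV2.2)
        else (MV2.1, pvAddAt MV2.2 a (-(fz j * ar i j)))) (M, V)).2 =
      K.foldl (fun V j => if 0 ≤ c j then V else pvAddAt V a (-(fz j * ar i j))) V := by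
  induction K generalizing M V with
  | nil => rfl
  | cons j K ih =>
    simp only [List.foldl_cons]
    by_cases h : 0 ≤ c j
    · simp only [if_pos h]; exact ih _ _
    · simp only [if_neg h]; exact ih _ _

theorem pvOuterGen_fst (c br fz : String → Int) (ar : String → String → Int)
    (Kin Kout : List String) (MV : List (List Int) × List Int) :
    (Kout.foldl (fun MV i => if 0 ≤ c i then
        Kin.foldl (fun MV2 j => if 0 ≤ c j then (pvAddAt2 MV2.1 (c i).toNat (c j).toNat (ar i j), MV2.2)
          else (MV2.1, pvAddAt MV2.2 (c i).toNat (-(fz j * ar i j))))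
          (MV.1, pvAddAt MV.2 (c i).toNat (br i))
      else MV) MV).1 =
      Kout.foldl (fun M i => if 0 ≤ c i then
        Kin.foldl (fun M j => if 0 ≤ c j then pvAddAt2 M (c i).toNat (c j).toNat (ar i j) else M) M
      else M) MV.1 := by
  induction Kout generalizing MV with
  | nil => rfl
  | cons i K ih =>
    simp only [List.foldl_cons]
    by_cases h : 0 ≤ c i
    · simp only [if_pos h]
      rw [ih]
      congr 1
      exact pvInner_fst c fz ar _ i Kin _ _
    · simp only [if_neg h]; exact ih MV

theorem pvOuterGen_snd (c br fz : String → Int) (ar : String → String → Int)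
    (Kin Kout : List String) (MV : List (List Int) × List Int) :
    (Kout.foldl (fun MV i => if 0 ≤ c i then
        Kin.foldl (fun MV2 j => if 0 ≤ c j then (pvAddAt2 MV2.1 (c i).toNat (c j).toNat (ar i j), MV2.2)
          else (MV2.1, pvAddAt MV2.2 (c i).toNat (-(fz j * ar i j))))
          (MV.1, pvAddAt MV.2 (c i).toNat (br i))
      else MV) MV).2 =
      Kout.foldl (fun V i => if 0 ≤ c i then
        pvAddAt V (c i).toNat (br i +
          (Kin.map (fun j => if ¬ 0 ≤ c j then -(fz j * ar i j) else 0)).sum)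
      else V) MV.2 := by
  induction Kout generalizing MV with
  | nil => rfl
  | cons i K ih =>
    simp only [List.foldl_cons]
    by_cases h : 0 ≤ c i
    · simp only [if_pos h]
      rw [ih]
      congr 1
      rw [pvInner_snd c fz ar _ i Kin _ _]
      have hstep : (fun (V : List Int) j => if 0 ≤ c j then V else pvAddAt V (c i).toNat (-(fz j * ar i j)))
          = fun (V : List Int) j => if ¬ 0 ≤ c j then pvAddAt V (c i).toNat (-(fz j * ar i j)) else V := by
        funext V j
        rw [ite_not]
      rw [hstep, pvFoldV_const, pvAddAt_pvAddAt]
    · simp only [if_neg h]; exact ih MV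

theorem pvOuter_fst (c br fz : String → Int) (ar : String → String → Int) (K : List String)
    (MV : List (List Int) × List Int) :
    (pvOuter c br fz ar K MV).1 =
      K.foldl (fun M i =>
        if 0 ≤ c i then
          K.foldl (fun M j => if 0 ≤ c j then pvAddAt2 M (c i).toNat (c j).toNat (ar i j) else M) M
        else M) MV.1 := by
  unfold pvOuter
  exact pvOuterGen_fst c br fz ar K K MV

theorem pvOuter_snd (c br fz : String → Int) (ar : String → String → Int) (K : List String)
    (MV : List (List Int) × List Int) :
    (pvOuter c br fz ar K MV).2 =
      K.foldl (fun V i =>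
        if 0 ≤ c i then
          pvAddAt V (c i).toNat (br i +
            (K.map (fun j => if ¬ 0 ≤ c j then -(fz j * ar i j) else 0)).sum)
        else V) MV.2 := by
  unfold pvOuter
  exact pvOuterGen_snd c br fz ar K K MV

theorem pvGroupsGen (c : String → Int) (K : List String) (g0 : List (List String)) (fr0 : List String) :
    K.foldl (fun gf i =>
        if 0 ≤ c i then (pvAppAt gf.1 (c i).toNat i, gf.2) else (gf.1, gf.2 ++ [i])) (g0, fr0) =
      (K.foldl (fun g i => if 0 ≤ c i then g.set ((c i).toNat) (g.getD ((c i).toNat) [] ++ [i]) else g) g0,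
       fr0 ++ K.filter (fun i => decide (¬ 0 ≤ c i))) := by
  induction K generalizing g0 fr0 with
  | nil => simp
  | cons i K ih =>
    simp only [List.foldl_cons, List.filter_cons]
    by_cases h : 0 ≤ c i
    · simp only [if_pos h]
      rw [ih]
      simp [pvAppAt, h]
    · simp only [if_neg h]
      rw [ih]
      simp [h, List.append_assoc]

theorem pvGroups_fst (c : String → Int) (K : List String) (g0 : List (List String)) :
    (pvGroups c K g0).1 =
      K.foldl (fun g i => if 0 ≤ c i then g.set ((c i).toNat) (g.getD ((c i).toNat) [] ++ [i]) else g) g0 := by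
  unfold pvGroups
  rw [pvGroupsGen]

theorem pvGroups_snd (c : String → Int) (K : List String) (g0 : List (List String)) :
    (pvGroups c K g0).2 = K.filter (fun i => decide (¬ 0 ≤ c i)) := by
  unfold pvGroups
  rw [pvGroupsGen]
  simp

-- nested (two-level) matrix fold lemmas -------------------------------------------------

theorem pvFoldM2_length (Kout Kin : List String) (Q P : String → Prop) [DecidablePred Q]
    [DecidablePred P] (a b : String → Nat) (d : String → String → Int) (M : List (List Int)) :
    (Kout.foldl (fun M i => if Q i then
        Kin.foldl (fun M j => if P j then pvAddAt2 M (a i) (b j) (d i j) else M) M else M) M).length =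
      M.length := by
  induction Kout generalizing M with
  | nil => rfl
  | cons i K ih =>
    simp only [List.foldl_cons]; rw [ih]; split_ifs
    · rw [pvFoldM_length]
    · rfl

theorem pvFoldM2_rowlen (Kout Kin : List String) (Q P : String → Prop) [DecidablePred Q]
    [DecidablePred P] (a b : String → Nat) (d : String → String → Int) (M : List (List Int)) (r : Nat) :
    ((Kout.foldl (fun M i => if Q i then
        Kin.foldl (fun M j => if P j then pvAddAt2 M (a i) (b j) (d i j) else M) M else M) M).getD r []).length =
      (M.getD r []).length := by
  induction Kout generalizing M with
  | nil => rfl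
  | cons i K ih =>
    simp only [List.foldl_cons]; rw [ih]; split_ifs
    · rw [pvFoldM_rowlen]
    · rfl

theorem pvFoldM2_cell (Kout Kin : List String) (Q P : String → Prop) [DecidablePred Q]
    [DecidablePred P] (a b : String → Nat) (d : String → String → Int) (M : List (List Int)) (r s : Nat) :
    pvCell (Kout.foldl (fun M i => if Q i then
        Kin.foldl (fun M j => if P j then pvAddAt2 M (a i) (b j) (d i j) else M) M else M) M) r s =
      pvCell M r s + (Kout.map (fun i => if Q i then
        (Kin.map (fun j =>
          if P j ∧ a i = r ∧ r < M.length ∧ b j = s ∧ s < (M.getD r []).length then d i j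
          else 0)).sum else 0)).sum := by
  induction Kout generalizing M with
  | nil => simp
  | cons i K ih =>
    simp only [List.foldl_cons, List.map_cons, List.sum_cons]
    by_cases hq : Q i
    · rw [if_pos hq, if_pos hq, ih]
      simp only [pvFoldM_length, pvFoldM_rowlen]
      rw [pvFoldM_cell]
      ring
    · rw [if_neg hq, if_neg hq, ih]
      ring

-- getD on constant maps -----------------------------------------------------------------

theorem pvGetD_map_const {α β : Type} (l : List α) (b : β) (r : Nat) :
    (l.map (fun _ => b)).getD r b = b := by
  by_cases h : r < l.length
  · rw [List.getD_eq_getElem _ _ (by simpa using h), List.getElem_map]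
  · rw [List.getD_eq_getElem?_getD, List.getElem?_eq_none (by simpa using h)]
    rfl

theorem pvSum_zero {β : Type} (L : List β) : (L.map (fun _ => (0 : Int))).sum = 0 := by
  induction L with
  | nil => rfl
  | cons x L ih => simp

theorem pvCell_M0 (cs : List Int) (r s : Nat) :
    pvCell (cs.map (fun _ => cs.map (fun _ => (0 : Int)))) r s = 0 := by
  unfold pvCell
  by_cases h : r < cs.length
  · have h1 : (cs.map (fun _ => cs.map (fun _ => (0 : Int)))).getD r [] = cs.map (fun _ => (0 : Int)) := by
      rw [List.getD_eq_getElem _ _ (by simpa using h), List.getElem_map]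
    rw [h1, pvGetD_map_const]
  · have h1 : (cs.map (fun _ => cs.map (fun _ => (0 : Int)))).getD r [] = [] := by
      rw [List.getD_eq_getElem?_getD, List.getElem?_eq_none (by simpa using h)]
      rfl
    rw [h1]
    rfl

theorem pvRow_M0_len (cs : List Int) (r : Nat) (h : r < cs.length) :
    ((cs.map (fun _ => cs.map (fun _ => (0 : Int)))).getD r []).length = cs.length := by
  rw [List.getD_eq_getElem _ _ (by simpa using h), List.getElem_map, List.length_map]

-- the main lemma: the two phase-2 computations agree ------------------------------------

theorem pvListEq {α : Type} (d : α) (l1 l2 : List α) (h1 : l1.length = l2.length)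
    (h2 : ∀ r, r < l1.length → l1.getD r d = l2.getD r d) : l1 = l2 := by
  apply List.ext_getElem h1
  intro i hi hj
  have := h2 i hi
  rwa [List.getD_eq_getElem _ _ hi, List.getD_eq_getElem _ _ hj] at this

theorem pvGetD_map {α β : Type} (f : α → β) (l : List α) (r : Nat) (d : β) (a0 : α)
    (h : r < l.length) : (l.map f).getD r d = f (l.getD r a0) := by
  rw [List.getD_eq_getElem _ _ (by simpa using h), List.getElem_map, List.getD_eq_getElem _ _ h]

theorem pvMain (c br fz : String → Int) (ar : String → String → Int) (K : List String)
    (cs : List Int) :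
    (pvOuter c br fz ar K (cs.map (fun _ => cs.map (fun _ => (0 : Int))), cs.map (fun _ => (0 : Int)))).1 =
      (pvGroups c K (cs.map (fun _ => ([] : List String)))).1.map (fun gi =>
        (pvGroups c K (cs.map (fun _ => ([] : List String)))).1.map (fun gj =>
          (gi.map (fun i => (gj.map (fun j => ar i j)).sum)).sum)) ∧
    (pvOuter c br fz ar K (cs.map (fun _ => cs.map (fun _ => (0 : Int))), cs.map (fun _ => (0 : Int)))).2 =
      (pvGroups c K (cs.map (fun _ => ([] : List String)))).1.map (fun gi =>
        (gi.map (fun i => br i)).sum -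
        (gi.map (fun i => ((pvGroups c K (cs.map (fun _ => ([] : List String)))).2.map
          (fun j => fz j * ar i j)).sum)).sum) := by
  have hGlen : (K.foldl (fun g i => if 0 ≤ c i then g.set ((c i).toNat) (g.getD ((c i).toNat) [] ++ [i]) else g)
      (cs.map (fun _ => ([] : List String)))).length = cs.length := by
    rw [pvFoldG_length K (fun i => 0 ≤ c i) (fun i => (c i).toNat) (fun i => i), List.length_map]
  have hGroups : ∀ r : Nat,
      (K.foldl (fun g i => if 0 ≤ c i then g.set ((c i).toNat) (g.getD ((c i).toNat) [] ++ [i]) else g)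
        (cs.map (fun _ => ([] : List String)))).getD r [] =
      K.filter (fun x => decide (0 ≤ c x ∧ (c x).toNat = r ∧ r < cs.length)) := by
    intro r
    rw [pvFoldG_getD K (fun i => 0 ≤ c i) (fun i => (c i).toNat) (fun i => i)]
    simp only [List.length_map, pvGetD_map_const, List.nil_append, List.map_id']
  constructor
  · -- the matrices
    rw [pvOuter_fst, pvGroups_fst]
    apply pvListEq ([] : List Int)
    · rw [pvFoldM2_length, List.length_map, List.length_map, hGlen]
    · intro r hrL
      have hr : r < cs.length := by
        rwa [pvFoldM2_length, List.length_map] at hrL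
      rw [pvGetD_map _ _ _ _ [] (by rw [hGlen]; exact hr), hGroups]
      apply pvListEq (0 : Int)
      · rw [pvFoldM2_rowlen, pvRow_M0_len cs r hr, List.length_map, hGlen]
      · intro s hsL
        have hs : s < cs.length := by
          rwa [pvFoldM2_rowlen, pvRow_M0_len cs r hr] at hsL
        show pvCell _ r s = _
        rw [pvFoldM2_cell, pvCell_M0, zero_add]
        simp only [List.length_map, pvRow_M0_len cs r hr]
        rw [pvGetD_map _ _ _ _ [] (by rw [hGlen]; exact hs), hGroups]
        rw [← pvSum_ite_filter K (fun x => 0 ≤ c x ∧ (c x).toNat = r ∧ r < cs.length)]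
        apply congrArg
        apply List.map_congr_left
        intro i _
        by_cases hA : 0 ≤ c i
        · by_cases hR : (c i).toNat = r
          · rw [if_pos hA, if_pos ⟨hA, hR, hr⟩,
              ← pvSum_ite_filter K (fun x => 0 ≤ c x ∧ (c x).toNat = s ∧ s < cs.length)]
            apply congrArg
            apply List.map_congr_left
            intro j _
            by_cases hB : 0 ≤ c j
            · by_cases hS : (c j).toNat = s
              · rw [if_pos ⟨hB, hR, hr, hS, hs⟩, if_pos ⟨hB, hS, hs⟩]
              · rw [if_neg (by tauto), if_neg (by tauto)]
            · rw [if_neg (by tauto), if_neg (by tauto)]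
          · rw [if_pos hA, if_neg (by tauto)]
            rw [List.map_congr_left (g := fun _ => (0 : Int)) (fun j _ => by rw [if_neg (by tauto)]),
              pvSum_zero]
        · rw [if_neg hA, if_neg (by tauto)]
  · -- the vectors
    rw [pvOuter_snd, pvGroups_fst, pvGroups_snd]
    apply pvListEq (0 : Int)
    · rw [pvFoldV_length, List.length_map, List.length_map, hGlen]
    · intro r hrL
      have hr : r < cs.length := by
        rwa [pvFoldV_length, List.length_map] at hrL
      rw [pvFoldV_getD, pvGetD_map_const]
      simp only [List.length_map]
      rw [pvGetD_map _ _ _ _ [] (by rw [hGlen]; exact hr), hGroups]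
      rw [← pvSum_map_sub, ← pvSum_ite_filter K (fun x => 0 ≤ c x ∧ (c x).toNat = r ∧ r < cs.length)]
      rw [zero_add]
      apply congrArg
      apply List.map_congr_left
      intro i _
      by_cases hPR : 0 ≤ c i ∧ (c i).toNat = r ∧ r < cs.length
      · rw [if_pos hPR, if_pos hPR,
          pvSum_ite_filter K (fun j => ¬ 0 ≤ c j) (fun j => -(fz j * ar i j)),
          pvSum_map_neg]
        ring
      · rw [if_neg hPR, if_neg hPR]

-- ===== VERDICT (by name: the statement is the Claim_ definition above) =====
theorem AB_spec : Claim_equal_AB := by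
  intro Ar Br froz sym s _ _
  unfold Spec_AB AB AB_alt
  obtain ⟨h1, h2⟩ := pvMain
    (fun i => (pvCod (PySem.Dict.ofList Br) (PySem.Dict.ofList froz) (PySem.Dict.ofList sym)).1.getD i (-1))
    (fun i => (PySem.Dict.ofList Br).getD i 0)
    (fun j => (PySem.Dict.ofList froz).getD j 0)
    (fun i j => ((PySem.Dict.ofList (Ar.map (fun p => (p.1, PySem.Dict.ofList p.2)))).getD i PySem.Dict.empty).getD j 0)
    (PySem.Dict.ofList Br).keys
    (PySem.List.pyRange 0 (pvCod (PySem.Dict.ofList Br) (PySem.Dict.ofList froz) (PySem.Dict.ofList sym)).2 1)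
  exact Prod.ext h1 h2
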